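-- pv_equiv track=rewrite | github.com/AlessandroPietrini/analisi-calcio | backend/core/modulo_suggerito.py | suggerisci_modulo
-- ===== SOURCE A (Python) =====
-- def suggerisci_modulo(giocatori):
--     esterni = [g for g in giocatori if g["position"] in ["ED", "ES"]]
--     centrocampisti = [g for g in giocatori if g["position"] == "CC"]
--     difensori = [g for g in giocatori if g["position"] == "DC"]
--
--     if len(esterni) >= 2 and len(centrocampisti) >= 3:
--         return "3-4-2-1"
--     elif len(difensori) >= 4:
--         return "4-3-3"
--     else:
--         return "4-4-2"
-- ===== SOURCE B (Python) =====
-- def suggerisci_modulo(giocatori):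
--     e = c = d = 0
--     for g in giocatori:
--         p = g["position"]
--         if p == "ED" or p == "ES":
--             e += 1
--         elif p == "CC":
--             c += 1
--         elif p == "DC":
--             d += 1
--         if e >= 2 and c >= 3:
--             # thresholds are monotone, so the first condition can be decided
--             # as soon as it becomes true, without scanning the rest
--             return "3-4-2-1"
--     return "4-3-3" if d >= 4 else "4-4-2"
-- ===== Notes on version B (the rewrite author's own statement) =====
-- stated objective: alternative
-- what changed: B replaces A's three full filtering scans by one streaming pass over the players that maintains three counters and returns '3-4-2-1' early the moment both thresholds are met (valid because the counters are monotone), deferring only the defender check to the end.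
import Mathlib
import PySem

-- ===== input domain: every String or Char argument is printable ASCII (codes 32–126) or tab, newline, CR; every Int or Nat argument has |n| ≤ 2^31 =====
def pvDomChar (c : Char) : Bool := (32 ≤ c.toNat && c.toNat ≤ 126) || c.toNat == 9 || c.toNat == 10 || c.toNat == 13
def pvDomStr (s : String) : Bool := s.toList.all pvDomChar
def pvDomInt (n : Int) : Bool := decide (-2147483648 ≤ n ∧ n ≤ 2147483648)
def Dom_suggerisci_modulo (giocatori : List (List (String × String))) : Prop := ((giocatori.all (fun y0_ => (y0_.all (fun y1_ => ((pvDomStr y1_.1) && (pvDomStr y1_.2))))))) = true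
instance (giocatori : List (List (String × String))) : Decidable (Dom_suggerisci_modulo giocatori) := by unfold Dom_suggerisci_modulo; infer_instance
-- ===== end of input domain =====

-- B replaces A's three filtering scans by one streaming pass with three counters and an
-- early return on the first branch (valid since the counters are monotone); return value only.

-- ===== PORT A =====
-- g["position"]: first-match lookup in the player dict; Pre_ guarantees the key exists, so getD "" is exact.
def pvPos (g : List (String × String)) : String := ((PySem.Dict.mk g).get? "position").getD ""

def suggerisci_modulo (giocatori : List (List (String × String))) : String :=
  let esterni := giocatori.filter (fun g => pvPos g == "ED" || pvPos g == "ES")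
  let centrocampisti := giocatori.filter (fun g => pvPos g == "CC")
  let difensori := giocatori.filter (fun g => pvPos g == "DC")
  if esterni.length ≥ 2 ∧ centrocampisti.length ≥ 3 then "3-4-2-1"
  else if difensori.length ≥ 4 then "4-3-3"
  else "4-4-2"

-- ===== PORT B =====
-- the for-loop with early return, as structural recursion over the remaining players;
-- the body's trailing "if e >= 2 and c >= 3: return" is the shared sm_step check
def sm_loop : List (List (String × String)) → Nat → Nat → Nat → String
  | [], _, _, d => if d ≥ 4 then "4-3-3" else "4-4-2"
  | g :: rest, e, c, d =>
    let p := pvPos g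
    let e := if p == "ED" || p == "ES" then e + 1 else e
    let c := if p == "CC" then c + 1 else c
    let d := if !(p == "ED" || p == "ES") && !(p == "CC") && p == "DC" then d + 1 else d
    if e ≥ 2 ∧ c ≥ 3 then "3-4-2-1" else sm_loop rest e c d

def suggerisci_modulo_alt (giocatori : List (List (String × String))) : String :=
  sm_loop giocatori 0 0 0

-- ===== PRECONDITION & SPEC =====
-- Pre_ excludes players without a "position" key, on which the Python A raises KeyError.
def Pre_suggerisci_modulo (giocatori : List (List (String × String))) : Prop :=
  (giocatori.all (fun g => ((PySem.Dict.mk g).get? "position").isSome)) = true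
instance (giocatori : List (List (String × String))) : Decidable (Pre_suggerisci_modulo giocatori) := by unfold Pre_suggerisci_modulo; infer_instance
def pvWitness_suggerisci_modulo : (List (List (String × String))) :=
  [[("position", "DC")], [("position", "ED"), ("name", "x")]]

def Spec_suggerisci_modulo (giocatori : List (List (String × String))) (out : String) : Prop := out = suggerisci_modulo_alt giocatori
instance (giocatori : List (List (String × String))) (out : String) : Decidable (Spec_suggerisci_modulo giocatori out) := by unfold Spec_suggerisci_modulo; infer_instance

-- ===== CLAIM (what is proved, stated in full; the proofs are below) =====
def Claim_equal_suggerisci_modulo : Prop := ∀ (giocatori : List (List (String × String))), Dom_suggerisci_modulo giocatori → Pre_suggerisci_modulo giocatori → Spec_suggerisci_modulo giocatori (suggerisci_modulo giocatori)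

-- ===== LEMMAS AND PROOFS =====

-- counts of the three categories in the remaining players
def cntE (l : List (List (String × String))) : Nat :=
  (l.filter (fun g => pvPos g == "ED" || pvPos g == "ES")).length
def cntC (l : List (List (String × String))) : Nat :=
  (l.filter (fun g => pvPos g == "CC")).length
def cntD (l : List (List (String × String))) : Nat :=
  (l.filter (fun g => pvPos g == "DC")).length

-- unfolding rules for the three counts on a cons cell
theorem cntE_cons_pos (g : List (String × String)) (rest : List (List (String × String)))
    (h : (pvPos g == "ED" || pvPos g == "ES") = true) : cntE (g :: rest) = cntE rest + 1 := by
  simp [cntE, h]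
theorem cntE_cons_neg (g : List (String × String)) (rest : List (List (String × String)))
    (h : (pvPos g == "ED" || pvPos g == "ES") = false) : cntE (g :: rest) = cntE rest := by
  simp [cntE, h]
theorem cntC_cons_pos (g : List (String × String)) (rest : List (List (String × String)))
    (h : (pvPos g == "CC") = true) : cntC (g :: rest) = cntC rest + 1 := by
  simp [cntC, h]
theorem cntC_cons_neg (g : List (String × String)) (rest : List (List (String × String)))
    (h : (pvPos g == "CC") = false) : cntC (g :: rest) = cntC rest := by
  simp [cntC, h]
theorem cntD_cons_pos (g : List (String × String)) (rest : List (List (String × String)))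
    (h : (pvPos g == "DC") = true) : cntD (g :: rest) = cntD rest + 1 := by
  simp [cntD, h]
theorem cntD_cons_neg (g : List (String × String)) (rest : List (List (String × String)))
    (h : (pvPos g == "DC") = false) : cntD (g :: rest) = cntD rest := by
  simp [cntD, h]

-- loop characterisation: as long as the first condition does not yet hold at entry,
-- the early-exit loop computes the same three-way decision over the final totals
theorem sm_loop_eq (l : List (List (String × String))) :
    ∀ e c d : Nat, ¬(e ≥ 2 ∧ c ≥ 3) →
    sm_loop l e c d =
      (if e + cntE l ≥ 2 ∧ c + cntC l ≥ 3 then "3-4-2-1"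
       else if d + cntD l ≥ 4 then "4-3-3" else "4-4-2") := by
  induction l with
  | nil =>
    intro e c d h
    simp [sm_loop, cntE, cntC, cntD, h]
  | cons g rest ih =>
    intro e c d h
    simp only [sm_loop]
    by_cases h1 : (pvPos g == "ED" || pvPos g == "ES") = true
    · have h2 : (pvPos g == "CC") = false := by
        rcases Bool.or_eq_true_iff.mp h1 with h' | h' <;> simp_all [beq_iff_eq]
      have h3 : (pvPos g == "DC") = false := by
        rcases Bool.or_eq_true_iff.mp h1 with h' | h' <;> simp_all [beq_iff_eq]
      simp only [h1, h2, Bool.not_true, Bool.false_and, if_true, if_false, Bool.false_eq_true,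
        cntE_cons_pos g rest h1, cntC_cons_neg g rest h2, cntD_cons_neg g rest h3]
      by_cases hc : e + 1 ≥ 2 ∧ c ≥ 3
      · rw [if_pos hc, if_pos (by omega)]
      · rw [if_neg hc, ih _ _ _ hc]
        have hx : e + (cntE rest + 1) = e + 1 + cntE rest := by omega
        rw [hx]
    · have h1f : (pvPos g == "ED" || pvPos g == "ES") = false := by simp_all
      by_cases h2 : (pvPos g == "CC") = true
      · have h3 : (pvPos g == "DC") = false := by simp_all [beq_iff_eq]
        simp only [h1f, h2, Bool.not_false, Bool.not_true, Bool.false_and,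
          Bool.and_false, if_true, if_false, Bool.false_eq_true,
          cntE_cons_neg g rest h1f, cntC_cons_pos g rest h2, cntD_cons_neg g rest h3]
        by_cases hc : e ≥ 2 ∧ c + 1 ≥ 3
        · rw [if_pos hc, if_pos (by omega)]
        · rw [if_neg hc, ih _ _ _ hc]
          have hx : c + (cntC rest + 1) = c + 1 + cntC rest := by omega
          rw [hx]
      · have h2f : (pvPos g == "CC") = false := by simp_all
        by_cases h3 : (pvPos g == "DC") = true
        · simp only [h1f, h2f, h3, Bool.not_false, Bool.and_true, if_true, if_false,
            Bool.false_eq_true, cntE_cons_neg g rest h1f, cntC_cons_neg g rest h2f,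
            cntD_cons_pos g rest h3]
          rw [if_neg h, ih _ _ _ h]
          have hx : d + (cntD rest + 1) = d + 1 + cntD rest := by omega
          rw [hx]
        · have h3f : (pvPos g == "DC") = false := by simp_all
          simp only [h1f, h2f, h3f, Bool.and_false, if_false, Bool.false_eq_true,
            cntE_cons_neg g rest h1f, cntC_cons_neg g rest h2f, cntD_cons_neg g rest h3f]
          rw [if_neg h, ih _ _ _ h]

-- ===== VERDICT (by name: the statement is the Claim_ definition above) =====
theorem suggerisci_modulo_spec : Claim_equal_suggerisci_modulo := by
  intro giocatori _ _
  show suggerisci_modulo giocatori = suggerisci_modulo_alt giocatori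
  unfold suggerisci_modulo suggerisci_modulo_alt
  rw [sm_loop_eq giocatori 0 0 0 (by omega)]
  simp only [cntE, cntC, cntD, Nat.zero_add]
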